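-- pv_equiv track=rewrite | github.com/ssshier/algorithms | nowcoder-hw/HJ025-数据分类处理.py | solve
-- ===== SOURCE A (Python) =====
-- def solve(i, r):
--     r.sort()
--     res = []
--     for r_index in range(len(r)):
--         res_i = []
--         for i_index in range(len(i)):
--             if r_index == 0 or (r_index > 0 and r[r_index] != r[r_index - 1]):
--                 if str(r[r_index]) in str(i[i_index]):
--                     res_i.append(i_index)
--                     res_i.append(i[i_index])
--         if res_i:
--             res_i.insert(0, len(res_i) // 2)
--             res_i.insert(0, r[r_index])
--             res.extend(res_i)
--     res.insert(0, len(res))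
--     return ' '.join(map(str, res))
-- ===== SOURCE B (Python) =====
-- def solve(i, r):
--     # Build an index: every (nonempty) substring of str(i[k]) -> list of (k, i[k]) in k-order.
--     index = {}
--     for idx, val in enumerate(i):
--         s = str(val)
--         subs = {s[a:b] for a in range(len(s)) for b in range(a + 1, len(s) + 1)}
--         for sub in subs:
--             index.setdefault(sub, []).append((idx, val))
--     res = []
--     for rv in sorted(set(r)):
--         ms = index.get(str(rv), [])
--         if ms:
--             res.append(rv)
--             res.append(len(ms))
--             for idx, val in ms:
--                 res.append(idx)
--                 res.append(val)
--     return ' '.join(map(str, [len(res)] + res))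
-- ===== Notes on version B (the rewrite author's own statement) =====
-- stated objective: faster
-- what changed: Instead of scanning all of i for every index of sorted r (with the duplicate check re-evaluated inside the inner loop), B builds a hash index from every substring of str(i[k]) to its matching (k, i[k]) pairs in one pass over i, then answers each unique sorted r value by a single dictionary lookup, so the unique-r x i inner scan disappears.
import Mathlib
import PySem

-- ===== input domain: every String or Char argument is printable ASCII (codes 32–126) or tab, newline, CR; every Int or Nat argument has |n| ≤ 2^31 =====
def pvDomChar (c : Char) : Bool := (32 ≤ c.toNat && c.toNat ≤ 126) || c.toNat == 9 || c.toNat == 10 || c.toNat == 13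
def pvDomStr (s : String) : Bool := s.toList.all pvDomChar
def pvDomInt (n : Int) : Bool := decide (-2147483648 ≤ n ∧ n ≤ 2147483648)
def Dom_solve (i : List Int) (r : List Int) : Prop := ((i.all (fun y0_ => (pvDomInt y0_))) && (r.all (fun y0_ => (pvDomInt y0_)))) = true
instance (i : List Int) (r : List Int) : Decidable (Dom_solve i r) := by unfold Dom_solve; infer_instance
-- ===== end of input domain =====

-- B replaces A's unique-r × all-i substring scan by a substring index (dict from every
-- substring of str(i[k]) to its matching (k, i[k]) pairs) built in one pass over i, then one
-- lookup per unique r value.  Return-value equivalence only: Python A sorts r in place, B does not.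

-- ===== PORT A =====
-- inner loop: 'for i_index in range(len(i)): …' building res_i
def innerA (i : List Int) (rs : List Int) (rIdx : Int) : List Int :=
  (PySem.List.pyRange 0 (PySem.List.len i)).foldl (fun res_i iIdx =>
    if rIdx = 0 ∨ (0 < rIdx ∧ PySem.List.pyGetD rs rIdx 0 ≠ PySem.List.pyGetD rs (rIdx - 1) 0) then
      if PySem.Str.isIn (PySem.Int.toStr (PySem.List.pyGetD rs rIdx 0))
          (PySem.Int.toStr (PySem.List.pyGetD i iIdx 0)) then
        (res_i ++ [iIdx]) ++ [PySem.List.pyGetD i iIdx 0]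
      else res_i
    else res_i) []

-- outer loop: 'for r_index in range(len(r)): …' building res (rs is r after the in-place sort)
def outerA (i : List Int) (rs : List Int) : List Int :=
  (PySem.List.pyRange 0 (PySem.List.len rs)).foldl (fun res rIdx =>
    if innerA i rs rIdx ≠ [] then
      res ++ PySem.List.insert
        (PySem.List.insert (innerA i rs rIdx) 0
          (PySem.Int.floordiv (PySem.List.len (innerA i rs rIdx)) 2)) 0
        (PySem.List.pyGetD rs rIdx 0)
    else res) []

def solve (i : List Int) (r : List Int) : String :=
  PySem.Str.join " "
    ((PySem.List.insert (outerA i (PySem.List.sorted r (fun x => x))) 0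
        (PySem.List.len (outerA i (PySem.List.sorted r (fun x => x))))).map PySem.Int.toStr)

-- ===== PORT B =====
-- {s[a:b] for a in range(len(s)) for b in range(a+1, len(s)+1)}
def subsOf (s : String) : PySem.Set String :=
  PySem.Set.ofList ((PySem.List.pyRange 0 (PySem.Str.len s)).flatMap (fun a =>
    (PySem.List.pyRange (a + 1) (PySem.Str.len s + 1)).map (fun b =>
      PySem.Str.slice s (some a) (some b))))

-- index = {}; for idx, val in enumerate(i): for sub in subs: index.setdefault(sub, []).append((idx, val))
def buildIndex (i : List Int) : PySem.Dict String (List (Int × Int)) :=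
  (PySem.List.enumerate i).foldl (fun d p =>
    (subsOf (PySem.Int.toStr p.2)).foldl (fun d sub =>
      d.insert sub (d.getD sub [] ++ [p])) d) PySem.Dict.empty

-- res accumulation: 'for rv in sorted(set(r)): ms = index.get(str(rv), []); …'
def resB (i : List Int) (r : List Int) : List Int :=
  (PySem.List.sorted (PySem.Set.ofList r) (fun x => x)).foldl (fun res rv =>
    if (buildIndex i).getD (PySem.Int.toStr rv) [] ≠ [] then
      (res ++ [rv, PySem.List.len ((buildIndex i).getD (PySem.Int.toStr rv) [])]) ++
        ((buildIndex i).getD (PySem.Int.toStr rv) []).flatMap (fun p => [p.1, p.2])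
    else res) []

def solve_alt (i : List Int) (r : List Int) : String :=
  PySem.Str.join " " ((PySem.List.len (resB i r) :: resB i r).map PySem.Int.toStr)

-- ===== PRECONDITION & SPEC =====
def Spec_solve (i : List Int) (r : List Int) (out : String) : Prop := out = solve_alt i r
instance (i : List Int) (r : List Int) (out : String) : Decidable (Spec_solve i r out) := by unfold Spec_solve; infer_instance

-- ===== CLAIM (what is proved, stated in full; the proofs are below) =====
def Claim_equal_solve : Prop := ∀ (i : List Int) (r : List Int), Dom_solve i r → Spec_solve i r (solve i r)

-- ===== LEMMAS AND PROOFS =====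

-- the pairs (index, value) of i whose str(value) contains s
def matchesS (s : String) (i : List Int) : List (Int × Int) :=
  (PySem.List.enumerate i).filter (fun p => PySem.Str.isIn s (PySem.Int.toStr p.2))

-- the common per-unique-r-value step both programs perform on res
def stepG (i : List Int) (res : List Int) (rv : Int) : List Int :=
  if matchesS (PySem.Int.toStr rv) i ≠ [] then
    (res ++ [rv, ((matchesS (PySem.Int.toStr rv) i).length : Int)]) ++
      (matchesS (PySem.Int.toStr rv) i).flatMap (fun p => [p.1, p.2])
  else res

theorem flat_pairs_length (ms : List (Int × Int)) :
    (ms.flatMap (fun p => [p.1, p.2])).length = 2 * ms.length := by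
  induction ms with
  | nil => simp
  | cons p t ih => simp [ih]; omega

theorem flat_pairs_eq_nil (ms : List (Int × Int)) :
    ms.flatMap (fun p => [p.1, p.2]) = [] ↔ ms = [] := by
  cases ms <;> simp

theorem flatMap_if_nil {α β : Type} (q : α → Bool) (h : α → List β) (l : List α) :
    (l.flatMap (fun x => if q x then h x else [])) = (l.filter q).flatMap h := by
  induction l with
  | nil => simp
  | cons x t ih => by_cases hx : q x <;> simp [hx, ih]

theorem toDigitsCore_ne_nil (b f n : Nat) (l : List Char) :
    Nat.toDigitsCore b (f + 1) n l ≠ [] := by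
  induction f generalizing n l with
  | zero =>
    simp only [Nat.toDigitsCore]
    split <;> simp
  | succ f ih =>
    simp only [Nat.toDigitsCore]
    split
    · simp
    · exact ih _ _

theorem toDigits_ne_nil (b n : Nat) : Nat.toDigits b n ≠ [] := by
  rw [Nat.toDigits]
  exact toDigitsCore_ne_nil b n n []

theorem toStr_toList_ne_nil (n : Int) : (PySem.Int.toStr n).toList ≠ [] := by
  rw [PySem.Int.toList_toStr, PySem.Int.toChars]
  split_ifs with h
  · simp
  · exact toDigits_ne_nil 10 n.toNat

theorem mem_subsOf (s t : String) :
    s ∈ subsOf t ↔ (s.toList ≠ [] ∧ PySem.Str.isIn s t = true) := by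
  unfold subsOf
  rw [PySem.Set.mem_ofList]
  simp only [List.mem_flatMap, List.mem_map, PySem.List.mem_pyRange_one, PySem.Str.len_eq]
  constructor
  · rintro ⟨a, ⟨ha0, haL⟩, b, ⟨hab, hbL⟩, rfl⟩
    have hsl : (PySem.Str.slice t (some a) (some b)).toList
        = List.take (b.toNat - a.toNat) (List.drop a.toNat t.toList) := by
      rw [PySem.Str.toList_slice,
        show (a : Int) = ((a.toNat : Nat) : Int) by omega,
        show (b : Int) = ((b.toNat : Nat) : Int) by omega,
        PySem.Chars.slice_eq_listSlice, PySem.List.slice_natCast]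
      simp only [Int.toNat_natCast]
    constructor
    · rw [hsl]
      intro hnil
      have hlen := congrArg List.length hnil
      rw [List.length_take, List.length_drop] at hlen
      simp only [List.length_nil] at hlen
      omega
    · rw [PySem.Str.isIn_iff_infix, hsl]
      exact List.IsInfix.trans (List.take_prefix _ _).isInfix (List.drop_suffix _ _).isInfix
  · rintro ⟨hne, hin⟩
    have hs1 : 0 < s.toList.length := List.length_pos_of_ne_nil hne
    obtain ⟨j, hpre⟩ := (PySem.Chars.exists_prefix_drop_iff_isIn s.toList t.toList).mpr
      (by rw [PySem.Chars.isIn_iff_infix]; exact (PySem.Str.isIn_iff_infix s t).mp hin)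
    have hjlt : j < t.toList.length := by
      by_contra h
      rw [List.drop_eq_nil_of_le (by omega)] at hpre
      exact hne (List.prefix_nil.mp hpre)
    have hslen : s.toList.length ≤ t.toList.length - j := by
      have := hpre.length_le
      simpa [List.length_drop] using this
    refine ⟨(j : Int), ⟨by omega, by exact_mod_cast hjlt⟩,
        ((j + s.toList.length : Nat) : Int), ⟨by push_cast; omega, by push_cast; omega⟩, ?_⟩
    apply String.toList_inj.mp
    rw [PySem.Str.toList_slice,
      show ((j : Nat) : Int) = ((j : Nat) : Int) from rfl,
      PySem.Chars.slice_eq_listSlice, PySem.List.slice_natCast,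
      show j + s.toList.length - j = s.toList.length by omega]
    exact (List.prefix_iff_eq_take.mp hpre).symm

theorem nodup_subsOf (t : String) : (subsOf t).Nodup := PySem.Set.nodup_ofList _

theorem inner_fold_getD (ss : List String) (hss : ss.Nodup)
    (d : PySem.Dict String (List (Int × Int))) (p : Int × Int) (s : String) :
    (ss.foldl (fun d sub => d.insert sub (d.getD sub [] ++ [p])) d).getD s [] =
      if s ∈ ss then d.getD s [] ++ [p] else d.getD s [] := by
  induction ss generalizing d with
  | nil => simp
  | cons x tl ih =>
    obtain ⟨hx, htl⟩ := List.nodup_cons.mp hss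
    simp only [List.foldl_cons]
    rw [ih htl]
    by_cases hmem : s ∈ tl
    · have hne : s ≠ x := fun h => hx (h ▸ hmem)
      simp [hmem, PySem.Dict.getD_insert, hne]
    · by_cases hsx : s = x
      · subst hsx
        simp [hmem]
      · simp [hmem, PySem.Dict.getD_insert, hsx]

theorem build_fold_getD (s : String) (hs : s.toList ≠ []) (xs : List (Int × Int))
    (d : PySem.Dict String (List (Int × Int))) :
    (xs.foldl (fun d p =>
        (subsOf (PySem.Int.toStr p.2)).foldl (fun d sub =>
          d.insert sub (d.getD sub [] ++ [p])) d) d).getD s [] =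
      d.getD s [] ++ xs.filter (fun p => PySem.Str.isIn s (PySem.Int.toStr p.2)) := by
  induction xs generalizing d with
  | nil => simp
  | cons p t ih =>
    simp only [List.foldl_cons]
    rw [ih]
    rw [inner_fold_getD _ (nodup_subsOf _)]
    by_cases hin : PySem.Str.isIn s (PySem.Int.toStr p.2) = true
    · have hmem : s ∈ subsOf (PySem.Int.toStr p.2) := (mem_subsOf _ _).mpr ⟨hs, hin⟩
      have hin' : PySem.Chars.isIn s.toList (PySem.Int.toChars p.2) = true := by
        simpa using hin
      rw [if_pos hmem]
      simp [hin']
    · have hmem : s ∉ subsOf (PySem.Int.toStr p.2) := fun h => hin ((mem_subsOf _ _).mp h).2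
      have hin' : PySem.Chars.isIn s.toList (PySem.Int.toChars p.2) = false := by
        simpa using hin
      rw [if_neg hmem]
      simp [hin']

theorem buildIndex_getD (i : List Int) (s : String) (hs : s.toList ≠ []) :
    (buildIndex i).getD s [] = matchesS s i := by
  unfold buildIndex matchesS
  rw [build_fold_getD s hs]
  rfl

-- A's inner loop, when the dedup condition holds, flattens the matching (index, value) pairs
theorem innerA_eq (i rs : List Int) (rIdx : Int)
    (hc : rIdx = 0 ∨ (0 < rIdx ∧ PySem.List.pyGetD rs rIdx 0 ≠ PySem.List.pyGetD rs (rIdx - 1) 0)) :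
    innerA i rs rIdx =
      (matchesS (PySem.Int.toStr (PySem.List.pyGetD rs rIdx 0)) i).flatMap (fun p => [p.1, p.2]) := by
  unfold innerA
  have hbody : (fun (res_i : List Int) (iIdx : Int) =>
      if rIdx = 0 ∨ (0 < rIdx ∧ PySem.List.pyGetD rs rIdx 0 ≠ PySem.List.pyGetD rs (rIdx - 1) 0) then
        if PySem.Str.isIn (PySem.Int.toStr (PySem.List.pyGetD rs rIdx 0))
            (PySem.Int.toStr (PySem.List.pyGetD i iIdx 0)) then
          (res_i ++ [iIdx]) ++ [PySem.List.pyGetD i iIdx 0]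
        else res_i
      else res_i) = (fun res_i iIdx =>
      res_i ++ (if PySem.Str.isIn (PySem.Int.toStr (PySem.List.pyGetD rs rIdx 0))
            (PySem.Int.toStr (PySem.List.pyGetD i iIdx 0)) then
          [iIdx, PySem.List.pyGetD i iIdx 0] else [])) := by
    funext res_i iIdx
    rw [if_pos hc]
    by_cases hin : PySem.Str.isIn (PySem.Int.toStr (PySem.List.pyGetD rs rIdx 0))
        (PySem.Int.toStr (PySem.List.pyGetD i iIdx 0)) = true
    · rw [if_pos hin, if_pos hin]
      simp
    · rw [if_neg hin, if_neg hin]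
      simp
  rw [hbody, PySem.List.foldl_append_eq_flatMap, flatMap_if_nil]
  rw [matchesS, PySem.List.enumerate_eq_map_pyRange i 0, List.filter_map, List.flatMap_map]
  simp [Function.comp_def]

theorem innerA_eq_nil (i rs : List Int) (rIdx : Int)
    (hc : ¬ (rIdx = 0 ∨ (0 < rIdx ∧ PySem.List.pyGetD rs rIdx 0 ≠ PySem.List.pyGetD rs (rIdx - 1) 0))) :
    innerA i rs rIdx = [] := by
  unfold innerA
  have hbody : (fun (res_i : List Int) (iIdx : Int) =>
      if rIdx = 0 ∨ (0 < rIdx ∧ PySem.List.pyGetD rs rIdx 0 ≠ PySem.List.pyGetD rs (rIdx - 1) 0) then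
        if PySem.Str.isIn (PySem.Int.toStr (PySem.List.pyGetD rs rIdx 0))
            (PySem.Int.toStr (PySem.List.pyGetD i iIdx 0)) then
          (res_i ++ [iIdx]) ++ [PySem.List.pyGetD i iIdx 0]
        else res_i
      else res_i) = (fun res_i _ => res_i) := by
    funext res_i iIdx
    rw [if_neg hc]
  rw [hbody, PySem.List.foldl_ignore]

-- A's outer-loop body, pointwise: either skip (condition false) or do the common step
theorem outerA_step (i rs : List Int) (res : List Int) (rIdx : Int) :
    (if innerA i rs rIdx ≠ [] then
      res ++ PySem.List.insert
        (PySem.List.insert (innerA i rs rIdx) 0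
          (PySem.Int.floordiv (PySem.List.len (innerA i rs rIdx)) 2)) 0
        (PySem.List.pyGetD rs rIdx 0)
    else res) =
      if rIdx = 0 ∨ (0 < rIdx ∧ PySem.List.pyGetD rs rIdx 0 ≠ PySem.List.pyGetD rs (rIdx - 1) 0) then
        stepG i res (PySem.List.pyGetD rs rIdx 0)
      else res := by
  by_cases hc : rIdx = 0 ∨ (0 < rIdx ∧ PySem.List.pyGetD rs rIdx 0 ≠ PySem.List.pyGetD rs (rIdx - 1) 0)
  · rw [if_pos hc, innerA_eq i rs rIdx hc, stepG]
    by_cases hnil : matchesS (PySem.Int.toStr (PySem.List.pyGetD rs rIdx 0)) i = []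
    · rw [hnil]
      simp
    · have hflat : (matchesS (PySem.Int.toStr (PySem.List.pyGetD rs rIdx 0)) i).flatMap
          (fun p => [p.1, p.2]) ≠ [] := by
        rw [Ne, flat_pairs_eq_nil]
        exact hnil
      rw [if_pos hflat, if_pos hnil]
      have hlen : PySem.List.len ((matchesS (PySem.Int.toStr (PySem.List.pyGetD rs rIdx 0)) i).flatMap
          (fun p => [p.1, p.2]))
          = ((2 * (matchesS (PySem.Int.toStr (PySem.List.pyGetD rs rIdx 0)) i).length : Nat) : Int) := by
        rw [PySem.List.len_eq, flat_pairs_length]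
      rw [hlen]
      have hdiv : PySem.Int.floordiv
          ((2 * (matchesS (PySem.Int.toStr (PySem.List.pyGetD rs rIdx 0)) i).length : Nat) : Int) 2
          = ((matchesS (PySem.Int.toStr (PySem.List.pyGetD rs rIdx 0)) i).length : Int) := by
        rw [show (2 : Int) = ((2 : Nat) : Int) from rfl, PySem.Int.floordiv_natCast]
        congr 1
        omega
      rw [hdiv, PySem.List.insert_zero, PySem.List.insert_zero]
      simp
  · rw [if_neg hc, innerA_eq_nil i rs rIdx hc]
    simp

-- the list of r-values A's outer loop actually processes
def selIdx (rs : List Int) : List Int :=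
  (PySem.List.pyRange 0 (PySem.List.len rs)).filter
    (fun rIdx => decide (rIdx = 0 ∨ (0 < rIdx ∧ PySem.List.pyGetD rs rIdx 0 ≠ PySem.List.pyGetD rs (rIdx - 1) 0)))

theorem outerA_eq_foldG (i rs : List Int) :
    outerA i rs = ((selIdx rs).map (fun j => PySem.List.pyGetD rs j 0)).foldl (stepG i) [] := by
  unfold outerA
  rw [PySem.List.foldl_congr_mem _ _
      (fun res rIdx => if rIdx = 0 ∨ (0 < rIdx ∧ PySem.List.pyGetD rs rIdx 0 ≠ PySem.List.pyGetD rs (rIdx - 1) 0) then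
        stepG i res (PySem.List.pyGetD rs rIdx 0) else res) []
      (fun res rIdx _ => outerA_step i rs res rIdx)]
  rw [PySem.List.foldl_ite_eq_foldl_filter]
  rw [List.foldl_map]
  rfl

-- members of selIdx are in-range first-occurrence indices of rs
theorem mem_selIdx (rs : List Int) (j : Int) :
    j ∈ selIdx rs ↔ (0 ≤ j ∧ j < (rs.length : Int) ∧
      (j = 0 ∨ (0 < j ∧ PySem.List.pyGetD rs j 0 ≠ PySem.List.pyGetD rs (j - 1) 0))) := by
  unfold selIdx
  simp [List.mem_filter, PySem.List.mem_pyRange_one]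
  tauto

-- on a sorted list, selected values are strictly increasing with the index
theorem sel_strict (r : List Int) (j k : Int)
    (hj : 0 ≤ j) (hjk : j < k) (hk : k < ((PySem.List.sorted r (fun x => x)).length : Int))
    (hck : k = 0 ∨ (0 < k ∧ PySem.List.pyGetD (PySem.List.sorted r (fun x => x)) k 0 ≠
        PySem.List.pyGetD (PySem.List.sorted r (fun x => x)) (k - 1) 0)) :
    PySem.List.pyGetD (PySem.List.sorted r (fun x => x)) j 0 <
      PySem.List.pyGetD (PySem.List.sorted r (fun x => x)) k 0 := by
  have hk0 : 0 < k := lt_of_le_of_lt hj hjk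
  rcases hck with h0 | ⟨_, hne⟩
  · omega
  · rw [PySem.List.pyGetD_eq_getElem _ 0 hj (by omega),
        PySem.List.pyGetD_eq_getElem _ 0 (by omega) hk]
    rw [PySem.List.pyGetD_eq_getElem _ 0 (by omega) hk,
        PySem.List.pyGetD_eq_getElem _ 0 (by omega) (by omega)] at hne
    have h1 : (PySem.List.sorted r (fun x => x))[j.toNat]'(by omega) ≤
        (PySem.List.sorted r (fun x => x))[(k - 1).toNat]'(by omega) :=
      PySem.List.sorted_id_getElem_mono r (by omega) (by omega)
    have h2 : (PySem.List.sorted r (fun x => x))[(k - 1).toNat]'(by omega) ≤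
        (PySem.List.sorted r (fun x => x))[k.toNat]'(by omega) :=
      PySem.List.sorted_id_getElem_mono r (by omega) (by omega)
    have h3 : (PySem.List.sorted r (fun x => x))[(k - 1).toNat]'(by omega) <
        (PySem.List.sorted r (fun x => x))[k.toNat]'(by omega) :=
      lt_of_le_of_ne h2 (fun h => hne h.symm)
    exact lt_of_le_of_lt h1 h3

theorem selVals_pairwise (r : List Int) :
    ((selIdx (PySem.List.sorted r (fun x => x))).map
      (fun j => PySem.List.pyGetD (PySem.List.sorted r (fun x => x)) j 0)).Pairwise (· < ·) := by
  rw [List.pairwise_map]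
  have hp : (selIdx (PySem.List.sorted r (fun x => x))).Pairwise (· < ·) :=
    List.Pairwise.filter _ (PySem.List.pairwise_lt_pyRange_one 0 _)
  refine hp.imp_of_mem ?_
  intro j k hj hk hjk
  rw [mem_selIdx] at hj hk
  exact sel_strict r j k hj.1 hjk hk.2.1 hk.2.2

theorem mem_selVals (r : List Int) (x : Int) :
    (x ∈ (selIdx (PySem.List.sorted r (fun x => x))).map
      (fun j => PySem.List.pyGetD (PySem.List.sorted r (fun x => x)) j 0)) ↔ x ∈ r := by
  set rs := PySem.List.sorted r (fun x => x) with hrs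
  have hmemrs : ∀ y, y ∈ rs ↔ y ∈ r := fun y => by
    rw [hrs]; exact PySem.List.mem_sorted r (fun x => x) false y
  constructor
  · rintro hx
    obtain ⟨j, hj, rfl⟩ := List.mem_map.mp hx
    rw [mem_selIdx] at hj
    rw [← hmemrs]
    rw [PySem.List.pyGetD_eq_getElem rs 0 hj.1 hj.2.1]
    exact List.getElem_mem _
  · intro hx
    have hxrs : x ∈ rs := (hmemrs x).mpr hx
    have hsome : (PySem.List.index? rs x).isSome := (PySem.List.index?_isSome_iff rs x).mpr hxrs
    obtain ⟨k, hk⟩ := Option.isSome_iff_exists.mp hsome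
    obtain ⟨hklen, hget, hmin⟩ := PySem.List.getElem_of_index?_eq_some hk
    refine List.mem_map.mpr ⟨(k : Int), ?_, ?_⟩
    · rw [mem_selIdx]
      refine ⟨by omega, by exact_mod_cast hklen, ?_⟩
      by_cases hk0 : k = 0
      · left; simp [hk0]
      · right
        refine ⟨by omega, ?_⟩
        rw [PySem.List.pyGetD_eq_getElem rs 0 (by omega) (by exact_mod_cast hklen),
            PySem.List.pyGetD_eq_getElem rs 0 (by omega) (by omega)]
        have hlt : ((k : Int) - 1).toNat < k := by omega
        have := hmin (((k : Int) - 1).toNat) hlt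
        simp only [Int.toNat_natCast]
        intro heq
        apply this
        rw [← hget]
        convert heq using 2
        omega
    · rw [PySem.List.pyGetD_eq_getElem rs 0 (by omega) (by exact_mod_cast hklen)]
      simp [hget]

theorem selVals_eq_sortedSet (r : List Int) :
    PySem.List.sorted (PySem.Set.ofList r) (fun x => x) =
      (selIdx (PySem.List.sorted r (fun x => x))).map
        (fun j => PySem.List.pyGetD (PySem.List.sorted r (fun x => x)) j 0) := by
  apply PySem.List.sorted_eq_of_perm_of_pairwise_lt
  · rw [List.perm_ext_iff_of_nodup
      ((selVals_pairwise r).imp (fun h => ne_of_lt h)) (PySem.Set.nodup_ofList r)]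
    intro a
    rw [mem_selVals, PySem.Set.mem_ofList]
  · exact selVals_pairwise r

theorem resB_eq_foldG (i r : List Int) :
    resB i r = (PySem.List.sorted (PySem.Set.ofList r) (fun x => x)).foldl (stepG i) [] := by
  unfold resB
  apply PySem.List.foldl_congr_mem
  intro acc rv _
  rw [buildIndex_getD i _ (toStr_toList_ne_nil rv)]
  rw [stepG]
  by_cases h : matchesS (PySem.Int.toStr rv) i = []
  · simp [h]
  · rw [if_pos h, if_pos h]
    simp [PySem.List.len_eq]

theorem outerA_eq_resB (i r : List Int) :
    outerA i (PySem.List.sorted r (fun x => x)) = resB i r := by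
  rw [outerA_eq_foldG, resB_eq_foldG, selVals_eq_sortedSet r]

-- ===== VERDICT (by name: the statement is the Claim_ definition above) =====
theorem solve_spec : Claim_equal_solve := by
  intro i r _
  unfold Spec_solve solve solve_alt
  rw [outerA_eq_resB, PySem.List.insert_zero, PySem.List.len_eq]
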